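-- pv_equiv track=rewrite | github.com/amararias/CodeFights | arcade/03_SmoothSailing/CF10_commonCharacterCount.py | commonCharacterCount
-- ===== SOURCE A (Python) =====
-- def createDictionary(s):
--     dictionary = {}
--     for c in s:
--         if c in dictionary:
--             dictionary[c] += 1
--         else:
--             dictionary[c] = 1
--     return dictionary
--
-- def commonCharacterCount(s1, s2):
--     d1 = createDictionary(list(s1))
--     d2 = createDictionary(list(s2))
--     count = 0
--     for k in d1.keys():
--         try:
--             count += min(d1[k], d2[k])
--         except KeyError:
--             pass
--     return count
--
-- s1 = "aabcc"
--
-- s2 = "adcaa"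
-- ===== SOURCE B (Python) =====
-- def commonCharacterCount(s1, s2):
--     a = sorted(s1)
--     b = sorted(s2)
--     i = j = count = 0
--     while i < len(a) and j < len(b):
--         if a[i] == b[j]:
--             count += 1
--             i += 1
--             j += 1
--         elif a[i] < b[j]:
--             i += 1
--         else:
--             j += 1
--     return count
-- ===== Notes on version B (the rewrite author's own statement) =====
-- stated objective: alternative
-- what changed: Replaces A's two frequency dictionaries and a loop over d1's keys with sorting both strings and counting matches in a single two-pointer merge pass.
import Mathlib
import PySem

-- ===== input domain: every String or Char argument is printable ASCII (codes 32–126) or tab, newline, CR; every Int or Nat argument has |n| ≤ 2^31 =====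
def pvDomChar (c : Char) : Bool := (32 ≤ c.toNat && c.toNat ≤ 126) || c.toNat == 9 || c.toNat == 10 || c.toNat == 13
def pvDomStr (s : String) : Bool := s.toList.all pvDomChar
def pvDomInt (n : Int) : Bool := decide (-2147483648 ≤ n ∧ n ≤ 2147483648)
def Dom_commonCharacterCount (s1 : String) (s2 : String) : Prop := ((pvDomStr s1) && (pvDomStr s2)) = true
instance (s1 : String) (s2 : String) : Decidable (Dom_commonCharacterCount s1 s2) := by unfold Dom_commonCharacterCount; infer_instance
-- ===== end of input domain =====

-- B replaces A's two frequency dictionaries and key-loop by sorting both strings and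
-- counting matches in one two-pointer merge pass (alternative decomposition, O(n log n)).

-- ===== PORT A =====
def createDictionary (s : List Char) : PySem.Dict Char Int :=
  s.foldl (fun d c => if d.contains c then d.insert c (d.getD c 0 + 1) else d.insert c 1)
    PySem.Dict.empty

def commonCharacterCount (s1 : String) (s2 : String) : Int :=
  let d1 := createDictionary s1.toList
  let d2 := createDictionary s2.toList
  d1.keys.foldl (fun count k =>
    match d2.get? k with      -- try: d1[k] always succeeds (k ∈ d1.keys); KeyError only from d2[k]
    | some v2 => count + min (d1.getD k 0) v2
    | none => count) 0

-- ===== PORT B =====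
-- fuel = |xs| + |ys| bounds the number of while-loop iterations (each iteration consumes one
-- unit); it only makes the recursion structural — the computation is exactly B's loop body.
def mergeCountFuel : Nat → List Char → List Char → Int
  | 0, _, _ => 0
  | _ + 1, [], _ => 0
  | _ + 1, _ :: _, [] => 0
  | n + 1, a :: xs, b :: ys =>
    if a = b then 1 + mergeCountFuel n xs ys
    else if a < b then mergeCountFuel n xs (b :: ys)
    else mergeCountFuel n (a :: xs) ys

def commonCharacterCount_alt (s1 : String) (s2 : String) : Int :=
  mergeCountFuel (s1.toList.length + s2.toList.length)
    (PySem.List.sorted s1.toList (fun x => x) false)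
    (PySem.List.sorted s2.toList (fun x => x) false)

-- ===== PRECONDITION & SPEC =====
def Spec_commonCharacterCount (s1 : String) (s2 : String) (out : Int) : Prop := out = commonCharacterCount_alt s1 s2
instance (s1 : String) (s2 : String) (out : Int) : Decidable (Spec_commonCharacterCount s1 s2 out) := by unfold Spec_commonCharacterCount; infer_instance

-- ===== CLAIM (what is proved, stated in full; the proofs are below) =====
def Claim_equal_commonCharacterCount : Prop := ∀ (s1 : String) (s2 : String), Dom_commonCharacterCount s1 s2 → Spec_commonCharacterCount s1 s2 (commonCharacterCount s1 s2)

-- ===== LEMMAS AND PROOFS =====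

-- A's hand-rolled dictionary builder is Counter(s).
theorem createDictionary_eq_counter (s : List Char) :
    createDictionary s = PySem.Dict.counter s := by
  rw [← PySem.Dict.foldl_insert_getD_add_one_eq_counter]
  unfold createDictionary
  congr 1
  funext d c
  split
  · rfl
  · rename_i h
    have hc : (d.get? c).isSome = false := by
      rw [← PySem.Dict.contains_eq_isSome_get?]; simpa using h
    have : d.getD c 0 = 0 := by
      show (d.get? c).getD 0 = 0
      cases hg : d.get? c with
      | none => rfl
      | some v => rw [hg] at hc; simp at hc
    rw [this]; norm_num

theorem get?_counter_eq (xs : List Char) (k : Char) :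
    (PySem.Dict.counter xs).get? k = if k ∈ xs then some ((xs.count k : Int)) else none := by
  by_cases h : k ∈ xs
  · have hc : ((PySem.Dict.counter xs).get? k).isSome = true := by
      rw [← PySem.Dict.contains_eq_isSome_get?, PySem.Dict.contains_counter]; simpa
    obtain ⟨v, hv⟩ := Option.isSome_iff_exists.mp hc
    have hg := PySem.Dict.getD_counter xs k
    rw [show (PySem.Dict.counter xs).getD k 0 = ((PySem.Dict.counter xs).get? k).getD 0 from rfl,
      hv] at hg
    simp only [Option.getD_some] at hg
    rw [hv, hg, if_pos h]
  · have hc : ((PySem.Dict.counter xs).get? k).isSome = false := by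
      rw [← PySem.Dict.contains_eq_isSome_get?, PySem.Dict.contains_counter]; simpa
    rw [if_neg h, ← Option.not_isSome_iff_eq_none]
    simp [hc]

-- A computes the sum, over the distinct characters of s1, of the min of the two counts.
theorem commonCharacterCount_eq_sum (s1 s2 : String) :
    commonCharacterCount s1 s2 =
      ((PySem.List.dedup s1.toList).map
        (fun k => min ((s1.toList.count k : Int)) ((s2.toList.count k : Int)))).sum := by
  unfold commonCharacterCount
  simp only [createDictionary_eq_counter]
  rw [show (PySem.Dict.counter s1.toList).keys = PySem.List.dedup s1.toList by
    rw [PySem.Dict.keys_counter, PySem.List.dedup_eq_ofList]]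
  have hstep : ∀ (count : Int) (k : Char), k ∈ PySem.List.dedup s1.toList →
      (match (PySem.Dict.counter s2.toList).get? k with
        | some v2 => count + min ((PySem.Dict.counter s1.toList).getD k 0) v2
        | none => count) =
      count + min ((s1.toList.count k : Int)) ((s2.toList.count k : Int)) := by
    intro count k hk
    have hk1 : k ∈ s1.toList := (PySem.List.mem_dedup _ _).mp hk
    rw [get?_counter_eq, PySem.Dict.getD_counter]
    by_cases h2 : k ∈ s2.toList
    · simp [h2]
    · have h0 : s2.toList.count k = 0 := List.count_eq_zero.mpr h2
      have h1 : 1 ≤ s1.toList.count k := List.one_le_count_iff.mpr hk1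
      rw [if_neg h2, h0]
      push_cast
      omega
  rw [PySem.List.foldl_congr_mem _ _ _ _ (fun acc x hx => hstep acc x hx),
    PySem.List.foldl_add]
  simp

-- B's merge loop over two sorted lists counts the multiset-intersection cardinality.
theorem mergeCountFuel_eq : ∀ (n : Nat) (xs ys : List Char),
    xs.length + ys.length ≤ n →
    xs.Pairwise (· ≤ ·) → ys.Pairwise (· ≤ ·) →
    mergeCountFuel n xs ys = (((xs : Multiset Char) ∩ (ys : Multiset Char)).card : Int) := by
  intro n
  induction n with
  | zero =>
    intro xs ys hlen _ _
    have h0 : xs = [] ∧ ys = [] := by cases xs <;> cases ys <;> simp_all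
    obtain ⟨rfl, rfl⟩ := h0
    simp [mergeCountFuel]
  | succ n ih =>
    intro xs ys hlen hx hy
    match xs, ys with
    | [], ys => simp [mergeCountFuel]
    | a :: xs, [] => simp [mergeCountFuel]
    | a :: xs, b :: ys =>
      by_cases heq : a = b
      · subst heq
        rw [mergeCountFuel, if_pos rfl,
          ih xs ys (by simp at hlen ⊢; omega) hx.tail hy.tail]
        have hm : ((a :: xs : List Char) : Multiset Char) ∩ ((a :: ys : List Char) : Multiset Char)
            = a ::ₘ ((xs : Multiset Char) ∩ (ys : Multiset Char)) := by
          rw [← Multiset.cons_coe a xs, ← Multiset.cons_coe a ys,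
            Multiset.cons_inter_of_pos _ (Multiset.mem_cons_self a _),
            Multiset.erase_cons_head]
        rw [hm, Multiset.card_cons]
        push_cast
        omega
      · by_cases hlt : a < b
        · have hna : a ∉ ((b :: ys : List Char) : Multiset Char) := by
            simp only [Multiset.mem_coe, List.mem_cons]
            rintro (rfl | hmem)
            · exact heq rfl
            · exact absurd hlt (not_lt.mpr (List.rel_of_pairwise_cons hy hmem))
          rw [mergeCountFuel, if_neg heq, if_pos hlt,
            ih xs (b :: ys) (by simp at hlen ⊢; omega) hx.tail hy]
          have hm : ((a :: xs : List Char) : Multiset Char) ∩ ((b :: ys : List Char) : Multiset Char)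
              = (xs : Multiset Char) ∩ ((b :: ys : List Char) : Multiset Char) := by
            rw [← Multiset.cons_coe a xs, Multiset.cons_inter_of_neg _ hna]
          rw [hm]
        · have hblt : b < a := lt_of_le_of_ne (not_lt.mp hlt) (fun h => heq h.symm)
          have hnb : b ∉ ((a :: xs : List Char) : Multiset Char) := by
            simp only [Multiset.mem_coe, List.mem_cons]
            rintro (rfl | hmem)
            · exact heq rfl
            · exact absurd hblt (not_lt.mpr (List.rel_of_pairwise_cons hx hmem))
          rw [mergeCountFuel, if_neg heq, if_neg hlt,
            ih (a :: xs) ys (by simp at hlen ⊢; omega) hx hy.tail]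
          have hm : ((a :: xs : List Char) : Multiset Char) ∩ ((b :: ys : List Char) : Multiset Char)
              = ((a :: xs : List Char) : Multiset Char) ∩ (ys : Multiset Char) := by
            rw [Multiset.inter_comm, ← Multiset.cons_coe b ys,
              Multiset.cons_inter_of_neg _ hnb, Multiset.inter_comm]
          rw [hm]

-- Bridge: the sum of per-character min counts is the multiset-intersection cardinality.
theorem sum_min_eq_card (l1 l2 : List Char) :
    ((PySem.List.dedup l1).map (fun k => min ((l1.count k : Int)) ((l2.count k : Int)))).sum
      = (((l2 : Multiset Char) ∩ (l1 : Multiset Char)).card : Int) := by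
  have hnd : (PySem.List.dedup l1).Nodup := PySem.List.nodup_dedup l1
  have hfin : (PySem.List.dedup l1).toFinset = l1.toFinset := by
    apply Finset.ext
    intro a
    simp
  have hcard : ((l2 : Multiset Char) ∩ (l1 : Multiset Char)).card
      = ∑ a ∈ l1.toFinset, min (l2.count a) (l1.count a) := by
    rw [← Multiset.toFinset_sum_count_eq]
    have hsummand : ∀ a, Multiset.count a ((l2 : Multiset Char) ∩ (l1 : Multiset Char))
        = min (l2.count a) (l1.count a) := by
      intro a; rw [Multiset.count_inter]; simp [Multiset.coe_count]
    simp only [hsummand]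
    apply Finset.sum_subset
    · intro a ha
      rw [Multiset.mem_toFinset, ← Multiset.count_pos, Multiset.count_inter] at ha
      rw [List.mem_toFinset, ← List.count_pos_iff]
      simp only [Multiset.coe_count] at ha
      omega
    · intro a ha hna
      rw [Multiset.mem_toFinset, ← Multiset.count_pos, hsummand] at hna
      omega
  rw [hcard, ← List.sum_toFinset _ hnd, hfin]
  push_cast
  apply Finset.sum_congr rfl
  intro a ha
  omega

-- ===== VERDICT (by name: the statement is the Claim_ definition above) =====
theorem commonCharacterCount_spec : Claim_equal_commonCharacterCount := by
  intro s1 s2 _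
  unfold Spec_commonCharacterCount commonCharacterCount_alt
  rw [commonCharacterCount_eq_sum, sum_min_eq_card,
    mergeCountFuel_eq _ _ _
      (by rw [PySem.List.length_sorted, PySem.List.length_sorted])
      (PySem.List.sorted_pairwise s1.toList (fun x => x))
      (PySem.List.sorted_pairwise s2.toList (fun x => x)),
    Multiset.coe_eq_coe.mpr (PySem.List.sorted_perm s1.toList (fun x => x) false),
    Multiset.coe_eq_coe.mpr (PySem.List.sorted_perm s2.toList (fun x => x) false),
    Multiset.inter_comm]
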